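-- pv_equiv track=rewrite | github.com/MaxGeo543/log-classification | src/test.py | strsim
-- ===== SOURCE A (Python) =====
-- def longest_common_substring(s1: str, s2: str):
--     n = len(s1)
--     m = len(s2)
--
--     dp = [[0]*(m+1) for _ in range(n+1)]
--     longest = 0
--     end_pos = 0
--
--     for i in range(1, n+1):
--         for j in range(1, m+1):
--             if s1[i-1] == s2[j-1]:
--                 dp[i][j] = dp[i-1][j-1] + 1
--                 if dp[i][j] > longest:
--                     longest = dp[i][j]
--                     end_pos = i
--             else:
--                 dp[i][j] = 0
--
--     return s1[end_pos - longest:end_pos]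
--
-- def strsim(s1: str, s2: str):
--     l1, l2 = [], []
--     common = []
--     lcs = longest_common_substring(s1, s2)
--     if lcs == "":
--         return [s1] if s1 != "" else [], [s2] if s2 != "" else [], []
--
--     spl1 = s1.split(lcs, 1)
--     spl2 = s2.split(lcs, 1)
--
--     rec1 = strsim(spl1[0], spl2[0])
--     l1.extend(rec1[0])
--     l2.extend(rec1[1])
--     common.extend(rec1[2])
--
--     common.append(lcs)
--     l1.append("")
--     l2.append("")
--
--     rec2 = strsim(spl1[1], spl2[1])
--     l1.extend(rec2[0])
--     l2.extend(rec2[1])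
--     common.extend(rec2[2])
--
--     return l1, l2, common
-- ===== SOURCE B (Python) =====
-- def _lcs(s1, s2):
--     # Longest common substring as (length, end index in s1): scan each diagonal
--     # of the implicit match grid once, keeping a running match-run length.
--     # Tie-break: among maximal-length substrings, smallest end index in s1.
--     n, m = len(s1), len(s2)
--     best, end = 0, 0
--     for d in range(-m + 1, n):
--         i0 = max(d, 0)
--         run = 0
--         i = i0
--         for x, y in zip(s1[i0:], s2[i0 - d:]):
--             if x == y:
--                 run += 1
--                 if run > best or (run == best and i + 1 < end):
--                     best, end = run, i + 1
--             else:
--                 run = 0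
--             i += 1
--     return best, end
--
--
-- def strsim(s1: str, s2: str):
--     best, end = _lcs(s1, s2)
--     if best == 0:
--         return ([s1] if s1 != "" else [], [s2] if s2 != "" else [], [])
--     lcs = s1[end - best:end]
--     p1, r1 = s1.split(lcs, 1)
--     p2, r2 = s2.split(lcs, 1)
--     a1, b1, c1 = strsim(p1, p2)
--     a2, b2, c2 = strsim(r1, r2)
--     return (a1 + [""] + a2, b1 + [""] + b2, c1 + [lcs] + c2)
-- ===== Notes on version B (the rewrite author's own statement) =====
-- stated objective: alternative
-- what changed: The longest-common-substring search drops A's (n+1)x(m+1) DP table entirely and instead scans each diagonal of the match grid once with a running match-run counter (O(1) extra space; ties broken by smallest end index in s1, exactly A's row-major first-maximum); the recursive splitting wrapper is behaviourally unchanged.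
import Mathlib
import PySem

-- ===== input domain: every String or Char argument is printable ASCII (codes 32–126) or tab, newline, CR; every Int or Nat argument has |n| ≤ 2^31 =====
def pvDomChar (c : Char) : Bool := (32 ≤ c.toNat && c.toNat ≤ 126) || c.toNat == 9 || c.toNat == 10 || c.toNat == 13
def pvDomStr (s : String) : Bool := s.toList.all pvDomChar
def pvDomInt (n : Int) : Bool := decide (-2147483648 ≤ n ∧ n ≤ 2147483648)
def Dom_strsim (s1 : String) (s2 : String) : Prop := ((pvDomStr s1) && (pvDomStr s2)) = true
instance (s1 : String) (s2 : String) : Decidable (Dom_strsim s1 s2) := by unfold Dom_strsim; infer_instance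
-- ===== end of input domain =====

-- B replaces A's (n+1)×(m+1) DP table for the longest common substring by a table-free
-- scan of the match-grid diagonals (one running match-run counter per diagonal, O(1) extra
-- space instead of the O(n*m) table); the recursive splitting wrapper is behaviourally
-- unchanged. Objective: alternative (same O(n*m) time; a timing run read ~1.3-1.5x, below
-- the threshold to call it faster).

-- ===== PORT A =====
-- A's longest_common_substring: full DP table, row-major scan, (longest, end_pos)
-- updated on strict improvement. pvLCS_A returns the final (dp, longest, end_pos).
def pvLCS_A (s1 s2 : String) : List (List Int) × Int × Int :=
  let n : Int := PySem.Str.len s1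
  let m : Int := PySem.Str.len s2
  let dp : List (List Int) := (PySem.List.pyRange 0 (n+1) 1).map (fun _ => PySem.List.pyRepeat [(0:Int)] (m+1))
  (PySem.List.pyRange 1 (n+1) 1).foldl (fun st i =>
    (PySem.List.pyRange 1 (m+1) 1).foldl (fun st j =>
      let dp := st.1
      let longest := st.2.1
      let end_pos := st.2.2
      if PySem.Str.pyGet? s1 (i-1) == PySem.Str.pyGet? s2 (j-1) then
        let v := PySem.List.pyGetD (PySem.List.pyGetD dp (i-1) []) (j-1) 0 + 1
        let dp := PySem.List.pySetD dp i (PySem.List.pySetD (PySem.List.pyGetD dp i []) j v)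
        if v > longest then (dp, v, i) else (dp, longest, end_pos)
      else
        (PySem.List.pySetD dp i (PySem.List.pySetD (PySem.List.pyGetD dp i []) j 0), longest, end_pos)) st)
    (dp, 0, 0)

def longest_common_substring (s1 s2 : String) : String :=
  let st := pvLCS_A s1 s2
  PySem.Str.slice s1 (some (st.2.2 - st.2.1)) (some st.2.2)

-- the recursion, made total with a fuel bound that Python's termination argument
-- (each recursive call strictly shrinks len(s1)+len(s2)) shows is never exhausted
def pvStrsimA : Nat → String → String → List String × List String × List String
  | 0, _, _ => ([], [], [])
  | fuel+1, s1, s2 =>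
    let lcs := longest_common_substring s1 s2
    if lcs = "" then ((if s1 ≠ "" then [s1] else []), (if s2 ≠ "" then [s2] else []), [])
    else
      let spl1 := (PySem.Str.splitMax? s1 lcs 1).getD []
      let spl2 := (PySem.Str.splitMax? s2 lcs 1).getD []
      let rec1 := pvStrsimA fuel (PySem.List.pyGetD spl1 0 "") (PySem.List.pyGetD spl2 0 "")
      let rec2 := pvStrsimA fuel (PySem.List.pyGetD spl1 1 "") (PySem.List.pyGetD spl2 1 "")
      (rec1.1 ++ [""] ++ rec2.1, rec1.2.1 ++ [""] ++ rec2.2.1, rec1.2.2 ++ [lcs] ++ rec2.2.2)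

def strsim (s1 : String) (s2 : String) : List String × List String × List String :=
  pvStrsimA (s1.toList.length + s2.toList.length + 1) s1 s2

-- ===== PORT B =====
-- B's _lcs: scan every diagonal of the match grid once with a running run-length,
-- keeping (best, end) under "longer, or equally long with smaller end index in s1".
def pvLCS_B (s1 s2 : String) : Int × Int :=
  let n : Int := PySem.Str.len s1
  let m : Int := PySem.Str.len s2
  (PySem.List.pyRange (-m + 1) n 1).foldl (fun be d =>
    let i0 : Int := max d 0
    let pairs := (PySem.Str.slice s1 (some i0) none).toList.zip (PySem.Str.slice s2 (some (i0 - d)) none).toList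
    let st := pairs.foldl (fun (st : Int × Int × Int × Int) xy =>
      let run := st.1
      let i := st.2.1
      let best := st.2.2.1
      let e := st.2.2.2
      if xy.1 == xy.2 then
        if run + 1 > best ∨ (run + 1 = best ∧ i + 1 < e) then (run + 1, i + 1, run + 1, i + 1)
        else (run + 1, i + 1, best, e)
      else (0, i + 1, best, e)) (0, i0, be.1, be.2)
    st.2.2) (0, 0)

def pvStrsimB : Nat → String → String → List String × List String × List String
  | 0, _, _ => ([], [], [])
  | fuel+1, s1, s2 =>
    let be := pvLCS_B s1 s2
    if be.1 = 0 then ((if s1 ≠ "" then [s1] else []), (if s2 ≠ "" then [s2] else []), [])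
    else
      let lcs := PySem.Str.slice s1 (some (be.2 - be.1)) (some be.2)
      let spl1 := (PySem.Str.splitMax? s1 lcs 1).getD []
      let spl2 := (PySem.Str.splitMax? s2 lcs 1).getD []
      let rec1 := pvStrsimB fuel (PySem.List.pyGetD spl1 0 "") (PySem.List.pyGetD spl2 0 "")
      let rec2 := pvStrsimB fuel (PySem.List.pyGetD spl1 1 "") (PySem.List.pyGetD spl2 1 "")
      (rec1.1 ++ [""] ++ rec2.1, rec1.2.1 ++ [""] ++ rec2.2.1, rec1.2.2 ++ [lcs] ++ rec2.2.2)

def strsim_alt (s1 : String) (s2 : String) : List String × List String × List String :=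
  pvStrsimB (s1.toList.length + s2.toList.length + 1) s1 s2

-- ===== PRECONDITION & SPEC =====
def Spec_strsim (s1 : String) (s2 : String) (out : List String × List String × List String) : Prop := out = strsim_alt s1 s2
instance (s1 : String) (s2 : String) (out : List String × List String × List String) : Decidable (Spec_strsim s1 s2 out) := by unfold Spec_strsim; infer_instance

-- ===== CLAIM (what is proved, stated in full; the proofs are below) =====
def Claim_equal_strsim : Prop := ∀ (s1 : String) (s2 : String), Dom_strsim s1 s2 → Spec_strsim s1 s2 (strsim s1 s2)

-- ===== LEMMAS AND PROOFS =====

-- pvSuff c1 c2 i j: length of the longest common suffix of c1.take i and c2.take j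
-- (the value of A's dp[i][j], and of B's running run-length counter).
def pvSuff (c1 c2 : List Char) : Nat → Nat → Nat
  | 0, _ => 0
  | _+1, 0 => 0
  | i+1, j+1 => if c1[i]? = c2[j]? then pvSuff c1 c2 i j + 1 else 0

def pvKey (c1 c2 : List Char) (i j : Nat) : Int × Int := ((pvSuff c1 c2 i j : Int), (i : Int))

-- the selection order both scans optimise: longer wins, ties won by smaller end index
def pvBetter (a b : Int × Int) : Bool := b.1 < a.1 || (a.1 == b.1 && a.2 < b.2)

def pvStep (s k : Int × Int) : Int × Int := if pvBetter k s then k else s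

def pvBest (l : List (Int × Int)) : Int × Int := l.foldl pvStep (0, 0)

-- row-major key list (A's scan order) and diagonal key list (B's scan order)
def pvKeysRM (c1 c2 : List Char) : List (Int × Int) :=
  (List.range c1.length).flatMap (fun i => (List.range c2.length).map (fun j => pvKey c1 c2 (i+1) (j+1)))

def pvDiagKeys (c1 c2 : List Char) (d : Int) : List (Int × Int) :=
  (List.range ((min (c1.length : Int) (d + c2.length) - max d 0).toNat)).map
    (fun t => pvKey c1 c2 ((max d 0).toNat + t + 1) (((max d 0) - d).toNat + t + 1))

def pvKeysDG (c1 c2 : List Char) : List (Int × Int) :=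
  (PySem.List.pyRange (-(c2.length : Int) + 1) (c1.length : Int) 1).flatMap (pvDiagKeys c1 c2)

-- ---- order lemmas ----
lemma pvBetter_false_iff (a b : Int × Int) :
    pvBetter a b = false ↔ (a.1 < b.1 ∨ (a.1 = b.1 ∧ b.2 ≤ a.2)) := by
  obtain ⟨a1, a2⟩ := a; obtain ⟨b1, b2⟩ := b
  simp [pvBetter]
  omega

lemma pvBetter_irrefl (a : Int × Int) : pvBetter a a = false := by
  rw [pvBetter_false_iff]; omega

lemma pvBetter_asymm {a b : Int × Int} (h : pvBetter a b = true) : pvBetter b a = false := by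
  obtain ⟨a1, a2⟩ := a; obtain ⟨b1, b2⟩ := b
  simp [pvBetter] at *
  omega

lemma pvBetter_neg_trans {a b c : Int × Int} (h1 : pvBetter a b = false) (h2 : pvBetter b c = false) :
    pvBetter a c = false := by
  rw [pvBetter_false_iff] at *; omega

lemma pvBetter_antisymm {a b : Int × Int} (h1 : pvBetter a b = false) (h2 : pvBetter b a = false) :
    a = b := by
  rw [pvBetter_false_iff] at *
  obtain ⟨a1, a2⟩ := a; obtain ⟨b1, b2⟩ := b
  simp only [Prod.mk.injEq]
  constructor <;> omega

lemma foldl_pvStep_mem (l : List (Int × Int)) (s : Int × Int) : l.foldl pvStep s ∈ s :: l := by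
  induction l generalizing s with
  | nil => simp
  | cons x t ih =>
    simp only [List.foldl_cons]
    rcases List.mem_cons.1 (ih (pvStep s x)) with h | h
    · rw [h]
      unfold pvStep
      split <;> simp
    · simp [h]

lemma foldl_pvStep_notBetter (l : List (Int × Int)) (s : Int × Int) :
    ∀ k ∈ s :: l, pvBetter k (l.foldl pvStep s) = false := by
  induction l generalizing s with
  | nil => intro k hk; simp at hk; subst hk; exact pvBetter_irrefl _
  | cons x t ih =>
    intro k hk
    simp only [List.foldl_cons]
    have hstep : pvBetter s (pvStep s x) = false ∧ pvBetter x (pvStep s x) = false := by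
      unfold pvStep
      split
      · rename_i hb
        exact ⟨pvBetter_asymm hb, pvBetter_irrefl _⟩
      · rename_i hb
        exact ⟨pvBetter_irrefl _, by simpa using hb⟩
    have hfin := ih (pvStep s x)
    have hsx : pvBetter (pvStep s x) (t.foldl pvStep (pvStep s x)) = false := hfin _ (by simp)
    rcases List.mem_cons.1 hk with h | h
    · exact pvBetter_neg_trans (h ▸ hstep.1) hsx
    · rcases List.mem_cons.1 h with h' | h'
      · exact pvBetter_neg_trans (h' ▸ hstep.2) hsx
      · exact hfin k (by simp [h'])

lemma pvBest_eq_of_mem_iff {l1 l2 : List (Int × Int)}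
    (h : ∀ k, k ∈ ((0 : Int), (0 : Int)) :: l1 ↔ k ∈ ((0 : Int), (0 : Int)) :: l2) :
    pvBest l1 = pvBest l2 := by
  have m1 : pvBest l1 ∈ ((0 : Int), (0 : Int)) :: l1 := foldl_pvStep_mem _ _
  have m2 : pvBest l2 ∈ ((0 : Int), (0 : Int)) :: l2 := foldl_pvStep_mem _ _
  have h12 : pvBetter (pvBest l1) (pvBest l2) = false :=
    foldl_pvStep_notBetter _ _ _ ((h _).1 m1)
  have h21 : pvBetter (pvBest l2) (pvBest l1) = false :=
    foldl_pvStep_notBetter _ _ _ ((h _).2 m2)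
  exact pvBetter_antisymm h12 h21

-- ---- facts about pvSuff ----
lemma pvSuff_le_left (c1 c2 : List Char) : ∀ i j, pvSuff c1 c2 i j ≤ i := by
  intro i
  induction i with
  | zero => intro j; simp [pvSuff]
  | succ i ih =>
    intro j
    cases j with
    | zero => simp [pvSuff]
    | succ j =>
      unfold pvSuff
      split
      · exact Nat.succ_le_succ (ih j)
      · omega

lemma pvSuff_right_zero (c1 c2 : List Char) (i : Nat) : pvSuff c1 c2 i 0 = 0 := by
  cases i <;> rfl

-- ---- membership characterisations ----
lemma mem_pvKeysRM {c1 c2 : List Char} {k : Int × Int} :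
    k ∈ pvKeysRM c1 c2 ↔ ∃ i j : Nat, i < c1.length ∧ j < c2.length ∧ k = pvKey c1 c2 (i+1) (j+1) := by
  simp only [pvKeysRM, List.mem_flatMap, List.mem_map, List.mem_range]
  constructor
  · rintro ⟨i, hi, j, hj, rfl⟩; exact ⟨i, j, hi, hj, rfl⟩
  · rintro ⟨i, j, hi, hj, rfl⟩; exact ⟨i, hi, j, hj, rfl⟩

lemma mem_pvKeysDG {c1 c2 : List Char} {k : Int × Int} :
    k ∈ pvKeysDG c1 c2 ↔ ∃ i j : Nat, i < c1.length ∧ j < c2.length ∧ k = pvKey c1 c2 (i+1) (j+1) := by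
  simp only [pvKeysDG, pvDiagKeys, List.mem_flatMap, List.mem_map, List.mem_range,
    PySem.List.mem_pyRange_one]
  constructor
  · rintro ⟨d, ⟨hd1, hd2⟩, t, ht, rfl⟩
    refine ⟨(max d 0).toNat + t, ((max d 0) - d).toNat + t, by omega, by omega, rfl⟩
  · rintro ⟨i, j, hi, hj, rfl⟩
    refine ⟨(i : Int) - j, ⟨by omega, by omega⟩, min i j, ?_, ?_⟩
    · have hmax : max ((i:Int) - j) 0 = ((i - min i j : Nat) : Int) := by
        rcases Nat.le_total j i with h | h
        · rw [max_eq_left (by omega)]; omega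
        · rw [max_eq_right (by omega)]; omega
      rw [hmax, Int.lt_toNat, lt_sub_iff_add_lt, lt_min_iff]
      constructor <;> omega
    · have h0 : (max ((i:Int) - j) 0).toNat = i - min i j := by
        rcases Nat.le_total j i with h | h
        · rw [max_eq_left (by omega)]; omega
        · rw [max_eq_right (by omega)]; omega
      have h1 : ((max ((i:Int) - j) 0) - ((i:Int) - j)).toNat = j - min i j := by
        rcases Nat.le_total j i with h | h
        · rw [max_eq_left (by omega)]; omega
        · rw [max_eq_right (by omega)]; omega
      rw [show (max ((i:Int) - j) 0).toNat + min i j + 1 = i + 1 from by omega,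
          show ((max ((i:Int) - j) 0) - ((i:Int) - j)).toNat + min i j + 1 = j + 1 from by omega]

-- ---- state invariant for the B-side scan ----
def pvGoodBE (be : Int × Int) : Prop := 0 ≤ be.1 ∧ (be.1 = 0 → be.2 = 0) ∧ 0 ≤ be.2

lemma pvStep_goodBE {be k : Int × Int} (h : pvGoodBE be) (hk1 : 0 ≤ k.1) (hk2 : 1 ≤ k.2) :
    pvGoodBE (pvStep be k) := by
  obtain ⟨b, e⟩ := be; obtain ⟨k1, k2⟩ := k
  obtain ⟨h1, h2, h3⟩ := h
  have hk1' : (0:Int) ≤ k1 := hk1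
  have hk2' : (1:Int) ≤ k2 := hk2
  have h1' : (0:Int) ≤ b := h1
  have h2' : b = 0 → e = 0 := h2
  have h3' : (0:Int) ≤ e := h3
  unfold pvStep
  split
  · rename_i hb
    simp only [pvBetter, Bool.or_eq_true, Bool.and_eq_true, decide_eq_true_eq, beq_iff_eq] at hb
    exact ⟨hk1', by omega, by omega⟩
  · exact ⟨h1', h2', h3'⟩

lemma foldl_pvStep_goodBE {l : List (Int × Int)} {be : Int × Int} (h : pvGoodBE be)
    (hl : ∀ k ∈ l, 0 ≤ k.1 ∧ 1 ≤ k.2) : pvGoodBE (l.foldl pvStep be) := by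
  induction l generalizing be with
  | nil => exact h
  | cons x t ih =>
    exact ih (pvStep_goodBE h (hl x (by simp)).1 (hl x (by simp)).2)
      (fun k hk => hl k (by simp [hk]))

lemma pvDiagKeys_good (c1 c2 : List Char) (d : Int) :
    ∀ k ∈ pvDiagKeys c1 c2 d, 0 ≤ k.1 ∧ 1 ≤ k.2 := by
  intro k hk
  simp only [pvDiagKeys, List.mem_map, List.mem_range] at hk
  obtain ⟨t, _, rfl⟩ := hk
  unfold pvKey
  constructor
  · positivity
  · push_cast; omega

-- zip of two drops as a map over an index range
lemma pvZipDrop (c1 c2 : List Char) (a b : Nat) :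
    (c1.drop a).zip (c2.drop b) =
      (List.range (min (c1.length - a) (c2.length - b))).map
        (fun t => (c1.getD (a+t) 'A', c2.getD (b+t) 'A')) := by
  apply List.ext_getElem
  · simp
  · intro k h1 h2
    have hk : k < min (c1.length - a) (c2.length - b) := by simpa using h2
    simp only [List.getElem_zip, List.getElem_map, List.getElem_range, List.getElem_drop]
    rw [List.getD_eq_getElem _ _ (by omega), List.getD_eq_getElem _ _ (by omega)]

-- ---- the B-side fold equals pvBest over the diagonal keys ----
lemma pvDiagFoldAux (c1 c2 : List Char) (d : Int) (be : Int × Int) (hg : pvGoodBE be) :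
    ∀ t, t ≤ (min (c1.length : Int) (d + c2.length) - max d 0).toNat →
    ((List.range t).map (fun u => (c1.getD ((max d 0).toNat + u) 'A', c2.getD (((max d 0) - d).toNat + u) 'A'))).foldl
        (fun (st : Int × Int × Int × Int) xy =>
          let run := st.1
          let i := st.2.1
          let best := st.2.2.1
          let e := st.2.2.2
          if xy.1 == xy.2 then
            if run + 1 > best ∨ (run + 1 = best ∧ i + 1 < e) then (run + 1, i + 1, run + 1, i + 1)
            else (run + 1, i + 1, best, e)
          else (0, i + 1, best, e)) (0, max d 0, be.1, be.2)
      = ((pvSuff c1 c2 ((max d 0).toNat + t) (((max d 0) - d).toNat + t) : Int), max d 0 + t,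
         ((List.range t).map (fun u => pvKey c1 c2 ((max d 0).toNat + u + 1) (((max d 0) - d).toNat + u + 1))).foldl pvStep be) := by
  intro t ht
  induction t with
  | zero =>
    have h0 : pvSuff c1 c2 ((max d 0).toNat) (((max d 0) - d).toNat) = 0 := by
      rcases le_total d 0 with h | h
      · have h' : (max d 0).toNat = 0 := by omega
        rw [h']; rfl
      · have h' : ((max d 0) - d).toNat = 0 := by omega
        rw [h', pvSuff_right_zero]
    simp [h0]
  | succ t ih =>
    have ht' : t ≤ (min (c1.length : Int) (d + c2.length) - max d 0).toNat := by omega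
    have hin1 : (max d 0).toNat + t < c1.length := by omega
    have hin2 : ((max d 0) - d).toNat + t < c2.length := by omega
    rw [List.range_succ, List.map_append, List.map_append, List.foldl_append, List.foldl_append,
      ih ht']
    simp only [List.map_cons, List.map_nil, List.foldl_cons, List.foldl_nil]
    rw [List.getD_eq_getElem _ _ hin1, List.getD_eq_getElem _ _ hin2]
    rw [show (max d 0).toNat + (t+1) = (max d 0).toNat + t + 1 from by omega,
        show ((max d 0) - d).toNat + (t+1) = ((max d 0) - d).toNat + t + 1 from by omega]
    have hsuff2 : pvSuff c1 c2 ((max d 0).toNat + t + 1) (((max d 0) - d).toNat + t + 1)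
        = if c1[(max d 0).toNat + t]? = c2[((max d 0) - d).toNat + t]? then
            pvSuff c1 c2 ((max d 0).toNat + t) (((max d 0) - d).toNat + t) + 1 else 0 := rfl
    set B := ((List.range t).map (fun u => pvKey c1 c2 ((max d 0).toNat + u + 1) (((max d 0) - d).toNat + u + 1))).foldl pvStep be with hB
    have hBgood : pvGoodBE B := by
      apply foldl_pvStep_goodBE hg
      intro k hk
      simp only [List.mem_map, List.mem_range] at hk
      obtain ⟨u, _, rfl⟩ := hk
      exact ⟨by unfold pvKey; positivity, by unfold pvKey; push_cast; omega⟩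
    have hkeysnd : pvKey c1 c2 ((max d 0).toNat + t + 1) (((max d 0) - d).toNat + t + 1)
        = ((pvSuff c1 c2 ((max d 0).toNat + t + 1) (((max d 0) - d).toNat + t + 1) : Int), max d 0 + t + 1) := by
      unfold pvKey
      simp only [Prod.mk.injEq, true_and]
      push_cast
      omega
    rw [hkeysnd]
    by_cases hc : c1[(max d 0).toNat + t]'hin1 = c2[((max d 0) - d).toNat + t]'hin2
    · have hc' : c1[(max d 0).toNat + t]? = c2[((max d 0) - d).toNat + t]? := by
        rw [List.getElem?_eq_getElem hin1, List.getElem?_eq_getElem hin2, hc]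
      rw [if_pos (by simp [hc] : (c1[(max d 0).toNat + t]'hin1 == c2[((max d 0) - d).toNat + t]'hin2) = true)]
      rw [hsuff2, if_pos hc']
      push_cast
      unfold pvStep
      by_cases hcond : (pvSuff c1 c2 ((max d 0).toNat + t) (((max d 0) - d).toNat + t) : Int) + 1 > B.1 ∨
          ((pvSuff c1 c2 ((max d 0).toNat + t) (((max d 0) - d).toNat + t) : Int) + 1 = B.1 ∧ max d 0 + (t : Int) + 1 < B.2)
      · have hbt : pvBetter ((pvSuff c1 c2 ((max d 0).toNat + t) (((max d 0) - d).toNat + t) : Int) + 1, max d 0 + (t : Int) + 1) B = true := by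
          simp only [pvBetter, Bool.or_eq_true, Bool.and_eq_true, decide_eq_true_eq, beq_iff_eq]
          omega
        rw [if_pos hcond, if_pos hbt]
        simp only [Prod.mk.injEq, and_true, true_and]
        omega
      · have hbf : pvBetter ((pvSuff c1 c2 ((max d 0).toNat + t) (((max d 0) - d).toNat + t) : Int) + 1, max d 0 + (t : Int) + 1) B = false := by
          rw [pvBetter_false_iff]
          simp only
          omega
        rw [if_neg hcond, if_neg (by simp [hbf])]
        simp only [Prod.mk.injEq, Prod.mk.eta, and_true, true_and]
        omega
    · have hc' : ¬ (c1[(max d 0).toNat + t]? = c2[((max d 0) - d).toNat + t]?) := by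
        rw [List.getElem?_eq_getElem hin1, List.getElem?_eq_getElem hin2]
        simp [hc]
      rw [if_neg (by simp [hc] : ¬ ((c1[(max d 0).toNat + t]'hin1 == c2[((max d 0) - d).toNat + t]'hin2) = true))]
      rw [hsuff2, if_neg hc']
      push_cast
      have hbf : pvBetter ((0 : Int), max d 0 + (t : Int) + 1) B = false := by
        rw [pvBetter_false_iff]
        obtain ⟨hg1, hg2, hg3⟩ := hBgood
        simp only
        rcases eq_or_lt_of_le hg1 with h | h
        · right
          refine ⟨h, ?_⟩
          rw [hg2 h.symm]
          positivity
        · left; exact h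
      unfold pvStep
      rw [if_neg (by simp [hbf])]
      simp only [Prod.mk.injEq, Prod.mk.eta, and_true, true_and]
      omega

lemma pvFoldFlat (f : Int × Int → Int → Int × Int) (g : Int → List (Int × Int)) :
    ∀ (l : List Int) (be : Int × Int), pvGoodBE be →
    (∀ d ∈ l, ∀ k ∈ g d, 0 ≤ k.1 ∧ 1 ≤ k.2) →
    (∀ be' d, pvGoodBE be' → d ∈ l → f be' d = (g d).foldl pvStep be') →
    l.foldl f be = (l.flatMap g).foldl pvStep be := by
  intro l
  induction l with
  | nil => intro be _ _ _; rfl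
  | cons d t ih =>
    intro be hbe hkeys hf
    rw [List.foldl_cons, List.flatMap_cons, List.foldl_append,
      hf be d hbe (by simp)]
    exact ih _ (foldl_pvStep_goodBE hbe (hkeys d (by simp)))
      (fun d' hd' => hkeys d' (by simp [hd'])) (fun be' d' hbe' hd' => hf be' d' hbe' (by simp [hd']))

lemma pvLCS_B_eq (s1 s2 : String) : pvLCS_B s1 s2 = pvBest (pvKeysDG s1.toList s2.toList) := by
  unfold pvLCS_B pvBest pvKeysDG
  dsimp only
  rw [PySem.Str.len_eq s1, PySem.Str.len_eq s2]
  apply pvFoldFlat _ (pvDiagKeys s1.toList s2.toList) _ _ ⟨le_refl 0, fun _ => rfl, le_refl 0⟩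
    (fun d _ => pvDiagKeys_good s1.toList s2.toList d)
  intro be d hbe _
  have hslice1 : (PySem.Str.slice s1 (some (max d 0)) none).toList = s1.toList.drop (max d 0).toNat := by
    rw [PySem.Str.toList_slice, PySem.Chars.slice_eq_listSlice, PySem.List.slice_from _ (le_max_right d 0)]
  have hslice2 : (PySem.Str.slice s2 (some (max d 0 - d)) none).toList = s2.toList.drop ((max d 0) - d).toNat := by
    rw [PySem.Str.toList_slice, PySem.Chars.slice_eq_listSlice, PySem.List.slice_from _ (by omega)]
  rw [hslice1, hslice2, pvZipDrop,
    show min (s1.toList.length - (max d 0).toNat) (s2.toList.length - ((max d 0) - d).toNat)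
      = (min (s1.toList.length : Int) (d + s2.toList.length) - max d 0).toNat from by omega]
  have := pvDiagFoldAux s1.toList s2.toList d be hbe
    ((min (s1.toList.length : Int) (d + s2.toList.length) - max d 0).toNat) (le_refl _)
  rw [this]
  rfl

-- ---- the A-side fold equals pvBest over the row-major keys ----

-- dp row i with entries up to column jmax filled in, and the whole dp table with
-- rows < i complete, row i filled up to column j, rows > i still zero
def pvRow (c1 c2 : List Char) (i jmax : Nat) : List Int :=
  (List.range (c2.length + 1)).map (fun t => if t ≤ jmax then (pvSuff c1 c2 i t : Int) else 0)

def pvDP (c1 c2 : List Char) (i j : Nat) : List (List Int) :=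
  (List.range (c1.length + 1)).map
    (fun r => if r < i then pvRow c1 c2 r c2.length else if r = i then pvRow c1 c2 i j else pvRow c1 c2 r 0)

lemma pvSetMapRange {β : Type} (f : Nat → β) (N k : Nat) (v : β) :
    ((List.range N).map f).set k v = (List.range N).map (fun t => if t = k then v else f t) := by
  apply List.ext_getElem
  · simp
  · intro idx h1 h2
    simp only [List.getElem_set, List.getElem_map, List.getElem_range]
    by_cases h : k = idx
    · rw [if_pos h, if_pos h.symm]
    · rw [if_neg h, if_neg (fun hh => h hh.symm)]

lemma pvRow_zeros (c1 c2 : List Char) (i jmax : Nat) (h : i = 0 ∨ jmax = 0) :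
    pvRow c1 c2 i jmax = List.replicate (c2.length + 1) 0 := by
  rw [List.eq_replicate_iff]
  refine ⟨by simp [pvRow], ?_⟩
  intro b hb
  simp only [pvRow, List.mem_map, List.mem_range] at hb
  obtain ⟨t, _, rfl⟩ := hb
  rcases h with h | h
  · subst h
    split
    · rw [show pvSuff c1 c2 0 t = 0 from rfl]; rfl
    · rfl
  · subst h
    split
    · rename_i h'
      rw [show t = 0 from by omega, pvSuff_right_zero]; rfl
    · rfl

lemma pvDP_init (c1 c2 : List Char) :
    (List.range (c1.length + 1)).map (fun _ => List.replicate (c2.length + 1) (0 : Int)) = pvDP c1 c2 1 0 := by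
  unfold pvDP
  apply List.map_congr_left
  intro r hr
  split
  · rename_i h
    rw [pvRow_zeros c1 c2 r c2.length (Or.inl (by omega))]
  · split
    · rw [pvRow_zeros c1 c2 1 0 (Or.inr rfl)]
    · rw [pvRow_zeros c1 c2 r 0 (Or.inr rfl)]

lemma pvDP_roll (c1 c2 : List Char) (i : Nat) :
    pvDP c1 c2 i c2.length = pvDP c1 c2 (i+1) 0 := by
  unfold pvDP
  apply List.map_congr_left
  intro r hr
  rcases Nat.lt_trichotomy r i with h | h | h
  · rw [if_pos h, if_pos (by omega)]
  · subst h
    rw [if_neg (by omega), if_pos rfl, if_pos (by omega)]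
  · rw [if_neg (by omega), if_neg (by omega), if_neg (by omega)]
    by_cases h2 : r = i + 1
    · rw [if_pos h2, h2, pvRow_zeros c1 c2 (i+1) 0 (Or.inr rfl)]
    · rw [if_neg h2]

lemma pvRowFoldAux (s1 s2 : String) (i' : Nat) (hin : i' + 1 ≤ s1.toList.length)
    (be : Int × Int) (hb : 0 ≤ be.1) (he : be.2 ≤ (i' : Int) + 1) :
    ∀ jc, jc ≤ s2.toList.length →
    (PySem.List.pyRange 1 ((jc : Int) + 1) 1).foldl
      (fun st j =>
        let dp := st.1
        let longest := st.2.1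
        let end_pos := st.2.2
        if PySem.Str.pyGet? s1 (((i' : Int) + 1) - 1) == PySem.Str.pyGet? s2 (j - 1) then
          let v := PySem.List.pyGetD (PySem.List.pyGetD dp (((i' : Int) + 1) - 1) []) (j - 1) 0 + 1
          let dp := PySem.List.pySetD dp ((i' : Int) + 1) (PySem.List.pySetD (PySem.List.pyGetD dp ((i' : Int) + 1) []) j v)
          if v > longest then (dp, v, (i' : Int) + 1) else (dp, longest, end_pos)
        else
          (PySem.List.pySetD dp ((i' : Int) + 1) (PySem.List.pySetD (PySem.List.pyGetD dp ((i' : Int) + 1) []) j 0), longest, end_pos))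
      (pvDP s1.toList s2.toList (i'+1) 0, be)
    = (pvDP s1.toList s2.toList (i'+1) jc,
       ((List.range jc).map (fun u => pvKey s1.toList s2.toList (i'+1) (u+1))).foldl pvStep be) := by
  intro jc
  induction jc with
  | zero =>
    intro _
    rw [show ((0 : Nat) : Int) + 1 = 1 from by omega, PySem.List.pyRange_one_eq_nil (le_refl 1)]
    rfl
  | succ jc ih =>
    intro hjc
    have hjc' : jc ≤ s2.toList.length := by omega
    have hjm : jc < s2.toList.length := by omega
    rw [show ((jc + 1 : Nat) : Int) + 1 = ((jc : Int) + 1) + 1 from by push_cast; ring,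
      PySem.List.pyRange_one_succ_right (by omega), List.foldl_append, ih hjc',
      List.range_succ, List.map_append, List.foldl_append]
    simp only [List.foldl_cons, List.foldl_nil, List.map_cons, List.map_nil]
    set B := ((List.range jc).map (fun u => pvKey s1.toList s2.toList (i'+1) (u+1))).foldl pvStep be with hB
    have hBbounds : 0 ≤ B.1 ∧ B.2 ≤ (i' : Int) + 1 := by
      have hmem := foldl_pvStep_mem ((List.range jc).map (fun u => pvKey s1.toList s2.toList (i'+1) (u+1))) be
      rcases List.mem_cons.1 hmem with h | h
      · rw [hB, h]; exact ⟨hb, he⟩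
      · simp only [List.mem_map, List.mem_range] at h
        obtain ⟨u, _, hu⟩ := h
        rw [hB, ← hu]
        unfold pvKey
        constructor
        · positivity
        · push_cast; omega
    -- index arithmetic
    rw [show ((i' : Int) + 1) - 1 = (i' : Int) from by ring,
      show ((jc : Int) + 1) - 1 = (jc : Int) from by ring,
      PySem.Str.pyGet?_natCast, PySem.Str.pyGet?_natCast]
    -- dp reads
    have hread1 : PySem.List.pyGetD (pvDP s1.toList s2.toList (i'+1) jc) (i' : Int) []
        = pvRow s1.toList s2.toList i' s2.toList.length := by
      rw [PySem.List.pyGetD_natCast]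
      unfold pvDP
      rw [PySem.List.getD_map_range _ _ _ _ (by omega), if_pos (by omega)]
    have hread2 : PySem.List.pyGetD (pvRow s1.toList s2.toList i' s2.toList.length) (jc : Int) 0
        = (pvSuff s1.toList s2.toList i' jc : Int) := by
      rw [PySem.List.pyGetD_natCast]
      unfold pvRow
      rw [PySem.List.getD_map_range _ _ _ _ (by omega), if_pos (by omega)]
    have hreadi : PySem.List.pyGetD (pvDP s1.toList s2.toList (i'+1) jc) ((i' : Int) + 1) []
        = pvRow s1.toList s2.toList (i'+1) jc := by
      rw [show (i' : Int) + 1 = ((i' + 1 : Nat) : Int) from by push_cast; ring, PySem.List.pyGetD_natCast]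
      unfold pvDP
      rw [PySem.List.getD_map_range _ _ _ _ (by omega), if_neg (by omega), if_pos rfl]
    have hsuffrec : pvSuff s1.toList s2.toList (i'+1) (jc+1)
        = if s1.toList[i']? = s2.toList[jc]? then pvSuff s1.toList s2.toList i' jc + 1 else 0 := rfl
    -- the written row equals pvRow (i'+1) (jc+1), whatever branch is taken
    have hwrite : ∀ w : Int, w = (pvSuff s1.toList s2.toList (i'+1) (jc+1) : Int) →
        PySem.List.pySetD (pvDP s1.toList s2.toList (i'+1) jc) ((i' : Int) + 1)
          (PySem.List.pySetD (pvRow s1.toList s2.toList (i'+1) jc) ((jc : Int) + 1) w)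
        = pvDP s1.toList s2.toList (i'+1) (jc+1) := by
      intro w hw
      rw [show (jc : Int) + 1 = ((jc + 1 : Nat) : Int) from by push_cast; ring,
        show (i' : Int) + 1 = ((i' + 1 : Nat) : Int) from by push_cast; ring,
        PySem.List.pySetD_natCast, PySem.List.pySetD_natCast]
      unfold pvDP pvRow
      rw [pvSetMapRange, pvSetMapRange]
      apply List.map_congr_left
      intro r hr
      simp only [List.mem_range] at hr
      by_cases hri : r = i' + 1
      · rw [if_pos hri, if_neg (by omega), if_pos hri]
        apply List.map_congr_left
        intro t ht
        simp only [List.mem_range] at ht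
        by_cases htj : t = jc + 1
        · rw [if_pos htj, if_pos (by omega), htj, hw]
        · rw [if_neg htj]
          by_cases htle : t ≤ jc
          · rw [if_pos htle, if_pos (by omega)]
          · rw [if_neg htle, if_neg (by omega)]
      · rw [if_neg hri, if_neg hri]
        rw [if_neg hri]
    rw [hread1, hread2, hreadi]
    by_cases hc : s1.toList[i']? = s2.toList[jc]?
    · rw [if_pos (by simpa using hc)]
      have hv : (pvSuff s1.toList s2.toList i' jc : Int) + 1 = (pvSuff s1.toList s2.toList (i'+1) (jc+1) : Int) := by
        rw [hsuffrec, if_pos hc]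
        push_cast
        ring
      rw [hwrite ((pvSuff s1.toList s2.toList i' jc : Int) + 1) hv]
      unfold pvStep
      have hkeyfst : pvKey s1.toList s2.toList (i'+1) (jc+1)
          = ((pvSuff s1.toList s2.toList i' jc : Int) + 1, (i' : Int) + 1) := by
        unfold pvKey
        rw [← hv]
        simp only [Prod.mk.injEq, true_and]
        push_cast
        ring
      rw [hkeyfst]
      by_cases hgt : (pvSuff s1.toList s2.toList i' jc : Int) + 1 > B.1
      · have hbt : pvBetter ((pvSuff s1.toList s2.toList i' jc : Int) + 1, (i' : Int) + 1) B = true := by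
          simp only [pvBetter, Bool.or_eq_true, Bool.and_eq_true, decide_eq_true_eq, beq_iff_eq]
          omega
        rw [if_pos hgt, if_pos hbt]
      · have hbf : pvBetter ((pvSuff s1.toList s2.toList i' jc : Int) + 1, (i' : Int) + 1) B = false := by
          rw [pvBetter_false_iff]
          simp only
          omega
        rw [if_neg hgt, if_neg (by simp [hbf])]
    · rw [if_neg (by simpa using hc)]
      have hv0 : (0 : Int) = (pvSuff s1.toList s2.toList (i'+1) (jc+1) : Int) := by
        rw [hsuffrec, if_neg hc]
        rfl
      rw [hwrite (0 : Int) hv0]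
      have hkeyfst : pvKey s1.toList s2.toList (i'+1) (jc+1) = ((0 : Int), (i' : Int) + 1) := by
        unfold pvKey
        rw [← hv0]
        simp only [Prod.mk.injEq, true_and]
        push_cast
        ring
      rw [hkeyfst]
      have hbf : pvBetter ((0 : Int), (i' : Int) + 1) B = false := by
        rw [pvBetter_false_iff]
        simp only
        omega
      unfold pvStep
      rw [if_neg (by simp [hbf])]

lemma pvOuterFoldA (s1 s2 : String) :
    ∀ ic, ic ≤ s1.toList.length →
    (PySem.List.pyRange 1 ((ic : Int) + 1) 1).foldl
      (fun st i =>
        (PySem.List.pyRange 1 ((s2.toList.length : Int) + 1) 1).foldl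
          (fun st j =>
            let dp := st.1
            let longest := st.2.1
            let end_pos := st.2.2
            if PySem.Str.pyGet? s1 (i - 1) == PySem.Str.pyGet? s2 (j - 1) then
              let v := PySem.List.pyGetD (PySem.List.pyGetD dp (i - 1) []) (j - 1) 0 + 1
              let dp := PySem.List.pySetD dp i (PySem.List.pySetD (PySem.List.pyGetD dp i []) j v)
              if v > longest then (dp, v, i) else (dp, longest, end_pos)
            else
              (PySem.List.pySetD dp i (PySem.List.pySetD (PySem.List.pyGetD dp i []) j 0), longest, end_pos)) st)
      (pvDP s1.toList s2.toList 1 0, 0, 0)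
    = (pvDP s1.toList s2.toList (ic+1) 0,
       ((List.range ic).flatMap (fun r => (List.range s2.toList.length).map (fun u => pvKey s1.toList s2.toList (r+1) (u+1)))).foldl pvStep (0, 0)) := by
  intro ic
  induction ic with
  | zero =>
    intro _
    rw [show ((0 : Nat) : Int) + 1 = 1 from by omega, PySem.List.pyRange_one_eq_nil (le_refl 1)]
    rfl
  | succ ic ih =>
    intro hic
    have hic' : ic ≤ s1.toList.length := by omega
    rw [show ((ic + 1 : Nat) : Int) + 1 = ((ic : Int) + 1) + 1 from by push_cast; ring,
      PySem.List.pyRange_one_succ_right (a := 1) (b := (ic : Int) + 1) (by omega), List.foldl_append, ih hic']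
    simp only [List.foldl_cons, List.foldl_nil]
    set Bic := ((List.range ic).flatMap (fun r => (List.range s2.toList.length).map (fun u => pvKey s1.toList s2.toList (r+1) (u+1)))).foldl pvStep ((0 : Int), (0 : Int)) with hBic
    have hbnd : 0 ≤ Bic.1 ∧ Bic.2 ≤ (ic : Int) + 1 := by
      have hmem := foldl_pvStep_mem ((List.range ic).flatMap (fun r => (List.range s2.toList.length).map (fun u => pvKey s1.toList s2.toList (r+1) (u+1)))) ((0 : Int), (0 : Int))
      rcases List.mem_cons.1 hmem with h | h
      · rw [hBic, h]; exact ⟨le_refl 0, by positivity⟩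
      · simp only [List.mem_flatMap, List.mem_map, List.mem_range] at h
        obtain ⟨r, hr, u, hu, hk⟩ := h
        rw [hBic, ← hk]
        unfold pvKey
        exact ⟨by positivity, by push_cast; omega⟩
    have hrow := pvRowFoldAux s1 s2 ic (by omega) Bic hbnd.1 hbnd.2 s2.toList.length (le_refl _)
    rw [hrow, pvDP_roll]
    rw [List.range_succ, List.flatMap_append, List.foldl_append]
    simp only [List.flatMap_cons, List.flatMap_nil, List.append_nil]
    rw [← hBic]

lemma pvLCS_A_eq (s1 s2 : String) : (pvLCS_A s1 s2).2 = pvBest (pvKeysRM s1.toList s2.toList) := by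
  unfold pvLCS_A
  dsimp only
  rw [PySem.Str.len_eq s1, PySem.Str.len_eq s2]
  have hinit : (PySem.List.pyRange 0 ((s1.toList.length : Int) + 1) 1).map (fun _ => PySem.List.pyRepeat [(0 : Int)] ((s2.toList.length : Int) + 1))
      = pvDP s1.toList s2.toList 1 0 := by
    rw [PySem.List.pyRepeat_singleton, show ((s2.toList.length : Int) + 1).toNat = s2.toList.length + 1 from by omega,
      PySem.List.pyRange_one, List.map_map]
    rw [show (((s1.toList.length : Int) + 1) - 0).toNat = s1.toList.length + 1 from by omega]
    exact pvDP_init s1.toList s2.toList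
  rw [hinit, pvOuterFoldA s1 s2 s1.toList.length (le_refl _)]
  rfl



-- ---- the two selections agree ----
lemma pvLCS_pair_eq (s1 s2 : String) : (pvLCS_A s1 s2).2 = pvLCS_B s1 s2 := by
  rw [pvLCS_A_eq, pvLCS_B_eq]
  exact pvBest_eq_of_mem_iff (by
    intro k
    simp only [List.mem_cons]
    rw [mem_pvKeysRM, mem_pvKeysDG])

-- bounds on the selected pair: 0 ≤ best ≤ end ≤ len s1
lemma pvLCS_B_bounds (s1 s2 : String) :
    0 ≤ (pvLCS_B s1 s2).1 ∧ (pvLCS_B s1 s2).1 ≤ (pvLCS_B s1 s2).2 ∧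
      (pvLCS_B s1 s2).2 ≤ (s1.toList.length : Int) := by
  rw [pvLCS_B_eq]
  have hmem := foldl_pvStep_mem (pvKeysDG s1.toList s2.toList) ((0 : Int), (0 : Int))
  rcases List.mem_cons.1 hmem with h | h
  · unfold pvBest; rw [h]; simp
  · rw [mem_pvKeysDG] at h
    obtain ⟨i, j, hi, hj, hk⟩ := h
    unfold pvBest
    rw [hk]
    unfold pvKey
    refine ⟨by positivity, ?_, by push_cast; omega⟩
    have := pvSuff_le_left s1.toList s2.toList (i+1) (j+1)
    push_cast
    omega

-- the produced lcs string is empty iff best = 0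
lemma pvLCS_lcs_empty_iff (s1 s2 : String) :
    (PySem.Str.slice s1 (some ((pvLCS_B s1 s2).2 - (pvLCS_B s1 s2).1)) (some (pvLCS_B s1 s2).2) = "") ↔ (pvLCS_B s1 s2).1 = 0 := by
  obtain ⟨h0, hbe, hen⟩ := pvLCS_B_bounds s1 s2
  rw [← String.toList_inj]
  have hb : (PySem.Str.slice s1 (some ((pvLCS_B s1 s2).2 - (pvLCS_B s1 s2).1)) (some (pvLCS_B s1 s2).2)).toList
      = (s1.toList.drop ((pvLCS_B s1 s2).2 - (pvLCS_B s1 s2).1).toNat).take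
          ((pvLCS_B s1 s2).2.toNat - ((pvLCS_B s1 s2).2 - (pvLCS_B s1 s2).1).toNat) := by
    rw [PySem.Str.toList_slice, PySem.Chars.slice_eq_listSlice,
      PySem.List.slice_toNat _ (by omega) (by omega)]
  rw [hb]
  show _ = ("" : String).toList ↔ _
  rw [show ("" : String).toList = [] from rfl]
  rw [← List.length_eq_zero_iff, List.length_take, List.length_drop]
  omega

lemma pvStrsim_fuel_eq : ∀ fuel s1 s2, pvStrsimA fuel s1 s2 = pvStrsimB fuel s1 s2 := by
  intro fuel
  induction fuel with
  | zero => intro s1 s2; rfl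
  | succ fuel ih =>
    intro s1 s2
    have hlcs : longest_common_substring s1 s2 =
        PySem.Str.slice s1 (some ((pvLCS_B s1 s2).2 - (pvLCS_B s1 s2).1)) (some (pvLCS_B s1 s2).2) := by
      unfold longest_common_substring
      dsimp only
      rw [pvLCS_pair_eq]
    show pvStrsimA (fuel+1) s1 s2 = pvStrsimB (fuel+1) s1 s2
    unfold pvStrsimA pvStrsimB
    rw [hlcs]
    by_cases h0 : (pvLCS_B s1 s2).1 = 0
    · rw [if_pos ((pvLCS_lcs_empty_iff s1 s2).2 h0), if_pos h0]
    · rw [if_neg (fun he => h0 ((pvLCS_lcs_empty_iff s1 s2).1 he)), if_neg h0]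
      simp only [ih]

-- ===== VERDICT (by name: the statement is the Claim_ definition above) =====
theorem strsim_spec : Claim_equal_strsim := by
  intro s1 s2 _
  unfold Spec_strsim strsim strsim_alt
  exact pvStrsim_fuel_eq _ s1 s2
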